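-- pv_equiv track=rewrite | github.com/amol179/DSA_Notes_Dump | USACO/Code_Force/1000/D. Challenging Valleys/D. Challenging Valleys.py | is_valley
-- ===== SOURCE A (Python) =====
-- def is_valley(arr):
--     n = len(arr)
--     l = r = -1
--
--     # Find the largest subarray of equal elements
--     i = 0
--     while i < n:
--         start = i
--         while i + 1 < n and arr[i] == arr[i + 1]:
--             i += 1
--         end = i
--
--         # Check the surrounding conditions
--         if (start == 0 or arr[start - 1] > arr[start]) and (
--             end == n - 1 or arr[end] < arr[end + 1]
--         ):
--             if l == -1:  # First occurrence
--                 l, r = start, end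
--             else:  # More than one valid subarray
--                 return "NO"
--         i += 1
--
--     # Ensure exactly one valid subarray
--     return "YES" if l != -1 else "NO"
-- ===== SOURCE B (Python) =====
-- def is_valley(arr):
--     # Compress consecutive duplicates, then run a descend-then-ascend state machine.
--     b = []
--     for x in arr:
--         if not b or b[-1] != x:
--             b.append(x)
--     if not b:
--         return "NO"
--     up = False
--     for p, q in zip(b, b[1:]):
--         if q > p:
--             up = True
--         elif up:  # a descent after an ascent: more than one valley
--             return "NO"
--     return "YES"
-- ===== Notes on version B (the rewrite author's own statement) =====
-- stated objective: simpler
-- what changed: A interleaves run-detection with a per-run validity test and early-exit bookkeeping via sentinel indices l/r; B first compresses consecutive duplicates into one pass-built list, then runs a plain descend-then-ascend state machine over adjacent pairs.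
import Mathlib
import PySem

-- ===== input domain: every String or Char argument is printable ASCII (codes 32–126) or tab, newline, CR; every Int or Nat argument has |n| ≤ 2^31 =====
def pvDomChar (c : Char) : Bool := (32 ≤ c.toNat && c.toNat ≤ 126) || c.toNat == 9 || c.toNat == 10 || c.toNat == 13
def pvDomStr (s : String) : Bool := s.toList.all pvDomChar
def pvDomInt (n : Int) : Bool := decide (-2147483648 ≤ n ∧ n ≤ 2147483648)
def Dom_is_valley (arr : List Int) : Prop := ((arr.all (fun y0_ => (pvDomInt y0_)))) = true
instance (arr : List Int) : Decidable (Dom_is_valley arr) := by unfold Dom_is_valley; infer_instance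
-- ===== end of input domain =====

-- B replaces A's interleaved run-detection-plus-validity-count with a two-phase pass:
-- compress consecutive duplicates, then a descend-then-ascend state machine (objective: simpler).

-- ===== PORT A =====
-- Inner while loop of A: skips the leading run of elements equal to the previous one;
-- returns (number of extra equal elements skipped, remaining list after the run).
def aRun (x : Int) (t : List Int) : Nat × List Int :=
  match t with
  | [] => (0, [])
  | y :: t' => if x == y then ((aRun y t').1 + 1, (aRun y t').2) else (0, y :: t')

theorem aRun_len (x : Int) (t : List Int) : (aRun x t).2.length ≤ t.length := by
  induction t generalizing x with
  | nil => simp [aRun]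
  | cons y t' ih =>
    simp only [aRun]
    split
    · exact le_trans (ih y) (Nat.le_succ _)
    · simp

-- Outer while loop of A, as the structural recursion over the remaining list.
-- `prev` is the element just before the current run (none ⟺ start == 0, and then
-- arr[start-1] = prev); `l`, `r`, `i` carry A's variables (r is written but never read).
def aLoop (prev : Option Int) (l r i : Int) (rest : List Int) : String :=
  match rest with
  | [] => if l != -1 then "YES" else "NO"
  | x :: t =>
    let k := (aRun x t).1
    let t' := (aRun x t).2
    if ((match prev with | none => true | some p => decide (p > x)) &&
        (match t' with | [] => true | y :: _ => decide (x < y))) then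
      if l == -1 then aLoop (some x) i (i + k) (i + k + 1) t'
      else "NO"
    else aLoop (some x) l r (i + k + 1) t'
  termination_by rest.length
  decreasing_by
    all_goals
      have := aRun_len x t
      simp only [List.length_cons]
      omega

def is_valley (arr : List Int) : String := aLoop none (-1) (-1) 0 arr

-- ===== PORT B =====
-- phase 1: b = consecutive-duplicate-free compression of arr (python loop appending to b)
def bStep (acc : List Int) (x : Int) : List Int :=
  if acc.isEmpty || !(acc.getLast? == some x) then acc ++ [x] else acc

-- phase 2: the state machine over adjacent pairs (python's zip loop with early return)
def bScan (up : Bool) (b : List Int) : String :=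
  match b with
  | [] => "YES"
  | [_] => "YES"
  | p :: q :: t =>
    if q > p then bScan true (q :: t)
    else if up then "NO"
    else bScan false (q :: t)

def is_valley_alt (arr : List Int) : String :=
  let b := arr.foldl bStep []
  if b.isEmpty then "NO" else bScan false b

-- ===== PRECONDITION & SPEC =====
def Spec_is_valley (arr : List Int) (out : String) : Prop := out = is_valley_alt arr
instance (arr : List Int) (out : String) : Decidable (Spec_is_valley arr out) := by unfold Spec_is_valley; infer_instance

-- ===== CLAIM (what is proved, stated in full; the proofs are below) =====
def Claim_equal_is_valley : Prop := ∀ (arr : List Int), Dom_is_valley arr → Spec_is_valley arr (is_valley arr)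

-- ===== LEMMAS AND PROOFS =====

-- dedup of a list given the previous (already emitted) value p
def dedP (p : Int) (t : List Int) : List Int :=
  match t with
  | [] => []
  | x :: t' => if x = p then dedP p t' else x :: dedP x t'

def ded (xs : List Int) : List Int :=
  match xs with
  | [] => []
  | x :: t => x :: dedP x t

def leftOf (p? : Option Int) (x : Int) : Bool :=
  match p? with | none => true | some p => decide (p > x)

def rightHead (x : Int) (t : List Int) : Bool :=
  match t with | [] => true | y :: _ => decide (x < y)

-- local-minima count of a (dedup) list, with left-neighbour context p?
def cntO (p? : Option Int) (b : List Int) : Nat :=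
  match b with
  | [] => 0
  | x :: t => (if leftOf p? x && rightHead x t then 1 else 0) + cntO (some x) t

-- run-wise minima count of the raw list (mirrors A's validity test per run)
def cntR (p? : Option Int) (xs : List Int) : Nat :=
  match xs with
  | [] => 0
  | x :: t =>
    (if leftOf p? x && rightHead x (t.dropWhile (fun y => y == x)) then 1 else 0) +
      cntR (some x) (t.dropWhile (fun y => y == x))
  termination_by xs.length
  decreasing_by
    have := List.length_dropWhile_le (fun y => y == x) t
    simp only [List.length_cons]
    omega

theorem aRun_snd (x : Int) (t : List Int) :
    (aRun x t).2 = t.dropWhile (fun y => y == x) := by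
  induction t generalizing x with
  | nil => simp [aRun]
  | cons y t' ih =>
    simp only [aRun, List.dropWhile]
    by_cases h : x = y
    · subst h; simp [ih]
    · have hxy : (x == y) = false := by simp [h]
      have hyx : (y == x) = false := by simp [Ne.symm h]
      simp [hxy, hyx]

theorem dropWhile_head_ne (x : Int) (t : List Int) :
    ∀ y ts, t.dropWhile (fun y => y == x) = y :: ts → ¬ y = x := by
  induction t with
  | nil => intro y ts h; simp [List.dropWhile] at h
  | cons z t' ih =>
    intro y ts h
    by_cases hz : z = x
    · simp [List.dropWhile, hz] at h; exact ih y ts h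
    · have hb : (z == x) = false := by simp [hz]
      simp [List.dropWhile, hb] at h
      exact h.1 ▸ hz

theorem ded_head? (xs : List Int) : (ded xs).head? = xs.head? := by
  cases xs <;> simp [ded]

theorem dedP_ded (x : Int) (t : List Int) :
    dedP x t = ded (t.dropWhile (fun y => y == x)) := by
  induction t generalizing x with
  | nil => simp [dedP, List.dropWhile, ded]
  | cons y t' ih =>
    by_cases h : y = x
    · subst h; simp [dedP, List.dropWhile, ih]
    · have hb : (y == x) = false := by simp [h]
      simp [dedP, List.dropWhile, h, hb, ded]

theorem rightHead_congr (x : Int) (l₁ l₂ : List Int) (h : l₁.head? = l₂.head?) :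
    rightHead x l₁ = rightHead x l₂ := by
  cases l₁ <;> cases l₂ <;> simp_all [rightHead]

theorem dedP_chain (t : List Int) : ∀ x, List.IsChain (· ≠ ·) (x :: dedP x t) := by
  induction t with
  | nil => intro x; exact List.isChain_singleton x
  | cons y t' ih =>
    intro x
    by_cases h : y = x
    · simp [dedP, h]; exact ih x
    · simp only [dedP, if_neg h]
      exact List.isChain_cons_cons.mpr ⟨Ne.symm h, ih y⟩

theorem cntO_pos (t : List Int) : ∀ (x : Int) (p? : Option Int),
    List.IsChain (· ≠ ·) (x :: t) → leftOf p? x = true → 1 ≤ cntO p? (x :: t) := by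
  induction t with
  | nil => intro x p? _ hl; simp [cntO, hl, rightHead]
  | cons y t' ih =>
    intro x p? hc hl
    rcases List.isChain_cons_cons.mp hc with ⟨hxy, hc'⟩
    by_cases hlt : x < y
    · simp [cntO, hl, rightHead, hlt]
    · have hgt : x > y := lt_of_le_of_ne (not_lt.mp hlt) (Ne.symm hxy)
      have := ih y (some x) hc' (by simp [leftOf]; omega)
      have h1 : cntO p? (x :: y :: t') =
          (if (leftOf p? x && rightHead x (y :: t')) = true then 1 else 0) +
            cntO (some x) (y :: t') := rfl
      rw [h1]
      omega

theorem aLoop_eq (n : Nat) : ∀ (rest : List Int), rest.length ≤ n →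
    ∀ (p? : Option Int) (l r i : Int), 0 ≤ i →
    aLoop p? l r i rest =
      if ((if l = -1 then 0 else 1) + cntR p? rest) = 1 then "YES" else "NO" := by
  induction n with
  | zero =>
    intro rest hlen p? l r i _
    have : rest = [] := by cases rest <;> simp_all
    subst this
    by_cases hl : l = -1 <;> simp [aLoop, cntR, hl]
  | succ n ih =>
    intro rest hlen p? l r i hi
    cases rest with
    | nil => by_cases hl : l = -1 <;> simp [aLoop, cntR, hl]
    | cons x t =>
      rw [aLoop.eq_def, cntR]
      simp only [aRun_snd, leftOf, rightHead]
      have hlen2 : (t.dropWhile (fun y => y == x)).length ≤ n := by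
        have h := List.length_dropWhile_le (fun y => y == x) t
        simp only [List.length_cons] at hlen
        omega
      by_cases hc : ((match p? with | none => true | some p => decide (p > x)) &&
          (match t.dropWhile (fun y => y == x) with
            | [] => true | y :: _ => decide (x < y))) = true
      · rw [if_pos hc]
        simp only [hc, if_true]
        by_cases hl : l = -1
        · rw [if_pos (show (l == -1) = true by simp [hl])]
          have h0 : (0:Int) ≤ i + ((aRun x t).1 : Int) + 1 := by omega
          rw [ih (t.dropWhile (fun y => y == x)) hlen2 (some x) i
              (i + ((aRun x t).1 : Int)) (i + ((aRun x t).1 : Int) + 1) h0]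
          have h2 : (if l = -1 then (0:Nat) else 1) = 0 := if_pos hl
          have h3 : (if i = -1 then (0:Nat) else 1) = 1 := if_neg (by omega)
          simp only [h2, h3, Nat.zero_add]
        · rw [if_neg (show ¬ ((l == -1) = true) by simp [hl])]
          have h2 : (if l = -1 then (0:Nat) else 1) = 1 := if_neg hl
          simp only [h2]
          rw [if_neg (show ¬ (1 + (1 + cntR (some x) (t.dropWhile (fun y => y == x))) = 1)
            by omega)]
      · rw [if_neg hc]
        rw [Bool.not_eq_true] at hc
        simp only [hc, Bool.false_eq_true, if_false]
        have h0 : (0:Int) ≤ i + ((aRun x t).1 : Int) + 1 := by omega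
        rw [ih (t.dropWhile (fun y => y == x)) hlen2 (some x) l r
            (i + ((aRun x t).1 : Int) + 1) h0]
        simp only [Nat.zero_add]

theorem cntR_cntO (n : Nat) : ∀ (xs : List Int), xs.length ≤ n → ∀ (p? : Option Int),
    (∀ p, p? = some p → xs.head? ≠ some p) →
    cntR p? xs = cntO p? (ded xs) := by
  induction n with
  | zero =>
    intro xs hlen p? _
    have : xs = [] := by cases xs <;> simp_all
    subst this; simp [cntR, cntO, ded]
  | succ n ih =>
    intro xs hlen p? hp
    cases xs with
    | nil => simp [cntR, cntO, ded]
    | cons x t =>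
      rw [cntR]
      have hded : ded (x :: t) = x :: ded (t.dropWhile (fun y => y == x)) := by
        rw [show ded (x :: t) = x :: dedP x t from rfl, dedP_ded]
      rw [hded]
      simp only [cntO]
      have hlen' : (t.dropWhile (fun y => y == x)).length ≤ n := by
        have := List.length_dropWhile_le (fun y => y == x) t
        simp at hlen; omega
      have hrh : rightHead x (t.dropWhile (fun y => y == x)) =
          rightHead x (ded (t.dropWhile (fun y => y == x))) :=
        (rightHead_congr x _ _ (ded_head? _).symm)
      rw [ih _ hlen' (some x)
        (by intro p hp'; cases hp'
            cases hdw : t.dropWhile (fun y => y == x) with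
            | nil => simp
            | cons y ts => simp; exact dropWhile_head_ne x t y ts hdw), hrh]

theorem bScan_eq (t : List Int) : ∀ (x : Int) (up : Bool) (p? : Option Int),
    List.IsChain (· ≠ ·) (x :: t) → leftOf p? x = !up →
    bScan up (x :: t) =
      if ((if up then 1 else 0) + cntO p? (x :: t)) = 1 then "YES" else "NO" := by
  induction t with
  | nil =>
    intro x up p? _ hl
    cases up <;> simp [bScan, cntO, rightHead, hl]
  | cons y t' ih =>
    intro x up p? hc hl
    rcases List.isChain_cons_cons.mp hc with ⟨hxy, hc'⟩
    by_cases hlt : x < y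
    · have hbs : bScan up (x :: y :: t') = bScan true (y :: t') := by
        simp [bScan, hlt]
      rw [hbs, ih y true (some x) hc' (by simp [leftOf]; omega)]
      simp only [cntO, hl, rightHead, hlt, decide_true, Bool.and_true]
      cases up <;> simp
    · have hgt : x > y := lt_of_le_of_ne (not_lt.mp hlt) (Ne.symm hxy)
      have hq : ¬ y > x := by omega
      cases up with
      | true =>
        have hbs : bScan true (x :: y :: t') = "NO" := by simp [bScan, hq]
        have hpos := cntO_pos t' y (some x) hc' (by simp [leftOf]; omega)
        have h1 : cntO p? (x :: y :: t') =
            (if (leftOf p? x && rightHead x (y :: t')) = true then 1 else 0) +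
              cntO (some x) (y :: t') := rfl
        rw [hbs, if_neg (by simp only [if_true, h1]; omega)]
      | false =>
        have hbs : bScan false (x :: y :: t') = bScan false (y :: t') := by
          simp [bScan, hq]
        rw [hbs, ih y false (some x) hc' (by simp [leftOf]; omega)]
        simp only [cntO, hl, rightHead]
        have : decide (x < y) = false := by simp; omega
        simp [this]

theorem foldl_bStep (xs : List Int) : ∀ (acc : List Int) (p : Int),
    acc.getLast? = some p → xs.foldl bStep acc = acc ++ dedP p xs := by
  induction xs with
  | nil => intro acc p _; simp [dedP]
  | cons x t ih =>
    intro acc p hl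
    have hne : acc.isEmpty = false := by cases acc <;> simp_all
    simp only [List.foldl, bStep, hne, hl]
    by_cases h : p = x
    · subst h
      simp only [beq_self_eq_true, Bool.not_true, Bool.or_false, Bool.false_eq_true]
      simp [ih acc p hl, dedP]
    · have hb : (some p == some x) = false := by simp [h]
      simp only [hb, Bool.not_false, Bool.or_true, if_pos]
      have hl' : (acc ++ [x]).getLast? = some x := by simp
      rw [ih (acc ++ [x]) x hl', dedP, if_neg (Ne.symm h), List.append_assoc]
      rfl

theorem foldl_ded (xs : List Int) : xs.foldl bStep [] = ded xs := by
  cases xs with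
  | nil => rfl
  | cons x t =>
    simp only [List.foldl, bStep, List.isEmpty_nil, Bool.true_or, if_pos, List.nil_append, ded]
    exact foldl_bStep t [x] x rfl

-- ===== VERDICT (by name: the statement is the Claim_ definition above) =====
theorem is_valley_spec : Claim_equal_is_valley := by
  intro arr _
  unfold Spec_is_valley
  show is_valley arr = is_valley_alt arr
  unfold is_valley is_valley_alt
  rw [foldl_ded]
  cases arr with
  | nil => simp [aLoop, ded]
  | cons x t =>
    show aLoop none (-1) (-1) 0 (x :: t) =
      if (ded (x :: t)).isEmpty = true then "NO" else bScan false (ded (x :: t))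
    have hded : ded (x :: t) = x :: dedP x t := rfl
    rw [aLoop_eq (x :: t).length (x :: t) le_rfl none (-1) (-1) 0 le_rfl,
        cntR_cntO (x :: t).length (x :: t) le_rfl none (by simp), hded]
    rw [bScan_eq (dedP x t) x false none (dedP_chain t x) (by simp [leftOf])]
    simp
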